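-- pv_equiv track=rewrite | github.com/shrinath-m-02/AI-Powered-Regulatory-Compliance-Checker-for-Contracts | regulatory_update_tracket.py | check_risks
-- ===== SOURCE A (Python) =====
-- def check_risks(contract_text, regulations):
--     missing = []
--     lower = contract_text.lower()
--
--     for reg in regulations:
--         clause = reg.get("required_clause", "").lower()
--         if clause in lower:
--             continue
--
--         missing.append(reg)
--
--     return missing
-- ===== SOURCE B (Python) =====
-- def check_risks(contract_text, regulations):
--     text = contract_text.lower()
--     clauses = {reg.get("required_clause", "").lower() for reg in regulations}
--     absent = {c for c in clauses if c not in text}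
--     return [reg for reg in regulations if reg.get("required_clause", "").lower() in absent]
-- ===== Notes on version B (the rewrite author's own statement) =====
-- stated objective: alternative
-- what changed: B dedupes the required clauses into a set, runs the substring scan once per DISTINCT clause to build an 'absent' set, then filters the regulations by set membership, instead of A's one substring scan of the whole text per regulation.
import Mathlib
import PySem

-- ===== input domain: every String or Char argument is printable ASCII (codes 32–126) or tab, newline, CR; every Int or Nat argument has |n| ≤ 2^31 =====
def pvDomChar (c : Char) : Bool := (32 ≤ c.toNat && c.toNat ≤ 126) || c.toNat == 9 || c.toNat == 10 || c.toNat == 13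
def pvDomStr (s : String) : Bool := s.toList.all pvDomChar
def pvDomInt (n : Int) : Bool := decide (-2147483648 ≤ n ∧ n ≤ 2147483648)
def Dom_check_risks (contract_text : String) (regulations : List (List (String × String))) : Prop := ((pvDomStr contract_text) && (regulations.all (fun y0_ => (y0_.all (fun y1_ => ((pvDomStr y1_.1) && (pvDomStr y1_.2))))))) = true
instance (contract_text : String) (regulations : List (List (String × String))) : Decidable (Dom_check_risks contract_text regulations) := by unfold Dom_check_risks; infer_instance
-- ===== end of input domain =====

-- B dedupes the required clauses, tests each distinct clause against the text once, then
-- filters the regulations by membership in the resulting 'absent' set (alternative structure).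

-- reg.get("required_clause", "").lower() — the same expression occurs verbatim in both Pythons
def pvClause (reg : List (String × String)) : String :=
  PySem.Str.lower ((PySem.Dict.mk reg).getD "required_clause" "")

-- ===== PORT A =====
def check_risks (contract_text : String) (regulations : List (List (String × String))) : List (List (String × String)) :=
  let lower := PySem.Str.lower contract_text
  regulations.foldl (fun missing reg =>
    let clause := pvClause reg
    if PySem.Str.isIn clause lower then missing else missing ++ [reg]) []

-- ===== PORT B =====
def check_risks_alt (contract_text : String) (regulations : List (List (String × String))) : List (List (String × String)) :=
  let text := PySem.Str.lower contract_text
  let clauses : PySem.Set String := PySem.Set.ofList (regulations.map pvClause)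
  -- {c for c in clauses if c not in text}: clauses is already duplicate-free, so the
  -- set comprehension is a filter of it (still duplicate-free, order preserved)
  let absent : PySem.Set String := clauses.filter (fun c => !(PySem.Str.isIn c text))
  regulations.filter (fun reg => PySem.Set.contains absent (pvClause reg))

-- ===== PRECONDITION & SPEC =====
def Spec_check_risks (contract_text : String) (regulations : List (List (String × String))) (out : List (List (String × String))) : Prop := out = check_risks_alt contract_text regulations
instance (contract_text : String) (regulations : List (List (String × String))) (out : List (List (String × String))) : Decidable (Spec_check_risks contract_text regulations out) := by unfold Spec_check_risks; infer_instance

-- ===== CLAIM (what is proved, stated in full; the proofs are below) =====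
def Claim_equal_check_risks : Prop := ∀ (contract_text : String) (regulations : List (List (String × String))), Dom_check_risks contract_text regulations → Spec_check_risks contract_text regulations (check_risks contract_text regulations)

-- ===== LEMMAS AND PROOFS =====

-- A's loop is the filter by "clause not in text"
theorem check_risks_eq_filter (t : String) (regs : List (List (String × String))) :
    check_risks t regs
      = regs.filter (fun reg => !(PySem.Str.isIn (pvClause reg) (PySem.Str.lower t))) := by
  unfold check_risks
  have h : (fun (missing : List (List (String × String))) reg =>
      if PySem.Str.isIn (pvClause reg) (PySem.Str.lower t) then missing else missing ++ [reg])
      = (fun missing reg =>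
      if !(PySem.Str.isIn (pvClause reg) (PySem.Str.lower t)) then missing ++ [reg] else missing) := by
    funext missing reg
    rcases (PySem.Str.isIn (pvClause reg) (PySem.Str.lower t)).eq_false_or_eq_true with hc | hc <;>
      rw [hc] <;> simp
  simp only [h, PySem.List.foldl_append_if_eq_filter, List.nil_append]

-- inside B, membership of a regulation's clause in 'absent' is exactly "clause not in text"
theorem contains_absent (t : String) (regs : List (List (String × String)))
    (reg : List (String × String)) (hmem : reg ∈ regs) :
    PySem.Set.contains
        ((PySem.Set.ofList (regs.map pvClause)).filter (fun c => !(PySem.Str.isIn c (PySem.Str.lower t))))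
        (pvClause reg)
      = !(PySem.Str.isIn (pvClause reg) (PySem.Str.lower t)) := by
  rcases (PySem.Str.isIn (pvClause reg) (PySem.Str.lower t)).eq_false_or_eq_true with hc | hc
  · rw [hc]
    simp [PySem.Set.contains_eq_listContains, List.contains_eq_mem, List.mem_filter,
      PySem.Set.mem_ofList]
    intro a _ _
    simpa [pysem] using hc
  · rw [hc]
    simp [PySem.Set.contains_eq_listContains, List.contains_eq_mem, List.mem_filter,
      PySem.Set.mem_ofList]
    refine ⟨⟨reg, hmem, rfl⟩, ?_⟩
    simpa [pysem] using hc

-- ===== VERDICT (by name: the statement is the Claim_ definition above) =====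
theorem check_risks_spec : Claim_equal_check_risks := by
  intro t regs _
  unfold Spec_check_risks check_risks_alt
  rw [check_risks_eq_filter]
  exact (List.filter_congr (fun reg hmem => (contains_absent t regs reg hmem).symm))
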